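-- pv_equiv track=rewrite | github.com/jinseok-in/Baekjoon | 백준/Silver/3986. 좋은 단어/좋은 단어.py | goodWord
-- ===== SOURCE A (Python) =====
-- def goodWord(word):
--     stack = []
--     for char in word:
--         if stack and stack[-1] == char:
--             stack.pop()
--         else:
--             stack.append(char)
--     return len(stack) == 0
-- ===== SOURCE B (Python) =====
-- def goodWord(word):
--     items = list(word)
--     while True:
--         kept = []
--         i = 0
--         changed = False
--         while i < len(items):
--             if i + 1 < len(items) and items[i] == items[i + 1]:
--                 i += 2
--                 changed = True
--             else:
--                 kept.append(items[i])
--                 i += 1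
--         if not changed:
--             return len(items) == 0
--         items = kept
-- ===== Notes on version B (the rewrite author's own statement) =====
-- stated objective: alternative
-- what changed: Replaced the single-pass stack cancellation with an iterative fixpoint reduction that repeatedly scans the whole list, deletes the first adjacent equal pair, and returns whether the fixpoint is empty (correct because adjacent-pair cancellation is confluent).
import Mathlib
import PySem

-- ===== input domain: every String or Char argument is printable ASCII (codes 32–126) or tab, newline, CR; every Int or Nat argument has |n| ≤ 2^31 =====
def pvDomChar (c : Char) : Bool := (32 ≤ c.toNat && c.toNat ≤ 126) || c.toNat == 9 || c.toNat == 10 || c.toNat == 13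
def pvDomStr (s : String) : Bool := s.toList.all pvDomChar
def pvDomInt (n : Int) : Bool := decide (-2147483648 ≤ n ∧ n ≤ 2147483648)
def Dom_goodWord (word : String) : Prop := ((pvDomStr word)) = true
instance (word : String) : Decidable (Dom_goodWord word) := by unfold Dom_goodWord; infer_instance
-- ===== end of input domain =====

-- B replaces the single stack pass by a multi-pass fixpoint reduction: each pass sweeps the
-- list once, dropping every adjacent equal pair it meets, repeated until a pass changes
-- nothing; equal results because adjacent-pair cancellation is confluent.

-- ===== PORT A =====
-- `if stack and stack[-1] == char: stack.pop() else: stack.append(char)`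
-- (stack.getLast? == some c already implies the stack is nonempty, as Python's `stack and` checks)
def gwStep (stack : List Char) (c : Char) : List Char :=
  if stack.getLast? == some c then stack.dropLast else stack ++ [c]

def goodWord (word : String) : Bool :=
  (word.toList.foldl gwStep []).length == 0

-- ===== PORT B =====
-- one pass of the inner `while i < len(items)` loop: drop each adjacent equal pair met
-- (skipping two) else keep the element (advancing one); the Bool is the `changed` flag
def sweep : List Char → List Char × Bool
  | [] => ([], false)
  | [a] => ([a], false)
  | a :: b :: t => if a = b then ((sweep t).1, true)
                   else ((a :: (sweep (b :: t)).1), (sweep (b :: t)).2)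

theorem sweep_length (l : List Char) :
    (sweep l).1.length ≤ l.length ∧ ((sweep l).2 = true → (sweep l).1.length < l.length) := by
  induction l using sweep.induct with
  | case1 => simp [sweep]
  | case2 a => simp [sweep]
  | case3 b t ih =>
    simp [sweep]
    omega
  | case4 a b t hab ih =>
    obtain ⟨ih1, ih2⟩ := ih
    simp only [List.length_cons] at ih1 ih2
    simp only [sweep, if_neg hab, List.length_cons]
    refine ⟨by omega, fun hf => ?_⟩
    have := ih2 hf
    omega

-- the `while True` loop: repeat passes until `changed` stays false, then test emptiness
def sweepFix (items : List Char) : Bool :=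
  match h : sweep items with
  | (kept, true) => sweepFix kept
  | (_, false) => items.length == 0
termination_by items.length
decreasing_by
  have := (sweep_length items).2
  rw [h] at this
  exact this rfl

def goodWord_alt (word : String) : Bool :=
  sweepFix word.toList

-- ===== PRECONDITION & SPEC =====
def Spec_goodWord (word : String) (out : Bool) : Prop := out = goodWord_alt word
instance (word : String) (out : Bool) : Decidable (Spec_goodWord word out) := by unfold Spec_goodWord; infer_instance

-- ===== CLAIM (what is proved, stated in full; the proofs are below) =====
def Claim_equal_goodWord : Prop := ∀ (word : String), Dom_goodWord word → Spec_goodWord word (goodWord word)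

-- ===== LEMMAS AND PROOFS =====

-- a stack with no two adjacent equal elements stays that way under gwStep
theorem gwStep_chain {s : List Char} (hs : s.IsChain (· ≠ ·)) (c : Char) :
    (gwStep s c).IsChain (· ≠ ·) := by
  unfold gwStep
  split
  · exact hs.dropLast
  · next hne =>
    rw [List.isChain_append]
    refine ⟨hs, List.isChain_singleton _, ?_⟩
    intro x hx y hy
    simp at hx hy
    subst hy
    simp at hne
    intro hxc
    subst hxc
    exact hne hx

-- on a reduced stack, pushing then immediately cancelling the same char is the identity
theorem gwStep_cancel {s : List Char} (hs : s.IsChain (· ≠ ·)) (a : Char) :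
    gwStep (gwStep s a) a = s := by
  unfold gwStep
  split
  · next h =>
    simp at h
    rcases List.eq_nil_or_concat s with rfl | ⟨s', b, rfl⟩
    · simp at h
    · rw [List.concat_eq_append] at h hs ⊢
      rw [List.getLast?_append] at h
      simp at h
      subst h
      have hne : s'.getLast? ≠ some b := by
        rcases List.eq_nil_or_concat s' with rfl | ⟨s'', c, rfl⟩
        · simp
        · rw [List.isChain_append] at hs
          have := hs.2.2 c (by simp) b (by simp)
          simp [List.concat_eq_append, List.getLast?_append]
          exact this
      simp [hne]
  · next h =>
    simp

-- a pass that sets no `changed` flag leaves the list unchanged and free of adjacent pairs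
theorem sweep_false {l : List Char} (h : (sweep l).2 = false) :
    (sweep l).1 = l ∧ l.IsChain (· ≠ ·) := by
  induction l using sweep.induct with
  | case1 => simp [sweep]
  | case2 a => simp [sweep]
  | case3 b t ih => simp [sweep] at h
  | case4 a b t hab ih =>
    simp only [sweep, if_neg hab] at h
    obtain ⟨h1, h2⟩ := ih h
    refine ⟨?_, List.isChain_cons_cons.mpr ⟨hab, h2⟩⟩
    simp only [sweep, if_neg hab]
    rw [h1]

-- one sweep pass does not change the stack run (started from any reduced stack)
theorem foldl_sweep (l : List Char) : ∀ (s : List Char), s.IsChain (· ≠ ·) →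
    (sweep l).1.foldl gwStep s = l.foldl gwStep s := by
  induction l using sweep.induct with
  | case1 => intro s _; simp [sweep]
  | case2 a => intro s _; simp [sweep]
  | case3 b t ih =>
    intro s hs
    have e : (sweep (b :: b :: t)).1 = (sweep t).1 := by simp [sweep]
    rw [e, ih s hs]
    simp only [List.foldl_cons]
    rw [gwStep_cancel hs b]
  | case4 a b t hab ih =>
    intro s hs
    simp only [sweep, if_neg hab, List.foldl_cons]
    exact ih (gwStep s a) (gwStep_chain hs a)

-- the stack run leaves a reduced list unchanged
theorem foldl_of_chain {l : List Char} (hl : l.IsChain (· ≠ ·)) :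
    l.foldl gwStep [] = l := by
  induction l using List.reverseRecOn with
  | nil => simp
  | append_singleton t a ih =>
    have ht : t.IsChain (· ≠ ·) := hl.prefix (by simp)
    rw [List.foldl_append, List.foldl_cons, List.foldl_nil, ih ht]
    unfold gwStep
    rcases List.eq_nil_or_concat t with rfl | ⟨t', b, rfl⟩
    · simp
    · rw [List.concat_eq_append] at hl ⊢
      rw [List.isChain_append] at hl
      have := hl.2.2 b (by simp) a (by simp)
      simp [List.getLast?_append]
      exact this

-- main invariant: the emptiness of the stack run equals the fixpoint's verdict
theorem foldl_eq_sweepFix (l : List Char) :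
    ((l.foldl gwStep []).length == 0) = sweepFix l := by
  rw [sweepFix]
  split
  · next kept h =>
    have h1 : (sweep l).1 = kept := by rw [h]
    rw [← foldl_sweep l [] List.isChain_nil, h1]
    exact foldl_eq_sweepFix kept
  · next kept h =>
    have h2 : (sweep l).2 = false := by rw [h]
    rw [foldl_of_chain (sweep_false h2).2]
termination_by l.length
decreasing_by
  rename_i heq
  have := (sweep_length l).2
  rw [heq] at this
  exact this rfl

-- ===== VERDICT (by name: the statement is the Claim_ definition above) =====
theorem goodWord_spec : Claim_equal_goodWord := by
  intro word _
  unfold Spec_goodWord goodWord goodWord_alt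
  exact foldl_eq_sweepFix word.toList
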